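-- pv_equiv track=rewrite | github.com/1lxrd/test1 | main.py | form_destination
-- ===== SOURCE A (Python) =====
-- def form_destination(path):
--     slash = path.rfind('\\')
--     destination = ""
--
--     if slash == -1:
--         destination = "out_" + path
--
--     else:
--         for i in range(0, slash + 1):
--             destination += path[i]
--
--         destination += 'out_'
--
--         for i in range(slash + 1, len(path)):
--             destination += path[i]
--
--     return destination
-- ===== SOURCE B (Python) =====
-- def form_destination(path):
--     before, sep, after = path.rpartition('\\')
--     return before + sep + 'out_' + after
-- ===== Notes on version B (the rewrite author's own statement) =====
-- stated objective: simpler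
-- what changed: Replaces rfind plus an if/else with two per-character accumulation loops by a single str.rpartition call and one concatenation expression.
import Mathlib
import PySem

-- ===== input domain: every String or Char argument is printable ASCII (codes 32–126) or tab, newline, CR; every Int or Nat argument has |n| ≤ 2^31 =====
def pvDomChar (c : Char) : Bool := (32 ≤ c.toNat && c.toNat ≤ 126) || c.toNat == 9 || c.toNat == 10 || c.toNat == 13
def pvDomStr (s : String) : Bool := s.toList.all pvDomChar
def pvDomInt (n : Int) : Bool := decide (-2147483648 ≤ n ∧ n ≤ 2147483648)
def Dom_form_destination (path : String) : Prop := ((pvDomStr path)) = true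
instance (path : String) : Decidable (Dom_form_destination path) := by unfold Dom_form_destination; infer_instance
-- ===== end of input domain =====

-- B replaces A's rfind + if/else + two per-character accumulation loops by a single
-- rpartition-style split and one concatenation (objective: simpler).

-- ===== PORT A =====
def form_destination (path : String) : String :=
  let slash := PySem.Str.rfind path "\\"
  if slash = -1 then String.ofList ("out_".toList ++ path.toList)
  else
    let cs := path.toList
    -- for i in range(0, slash + 1): destination += path[i]
    let d1 := List.foldl (fun acc i => acc ++ [PySem.List.pyGetD cs i 'a'])
                ([] : List Char) (PySem.List.pyRange 0 (slash + 1))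
    -- destination += 'out_'
    let d2 := d1 ++ "out_".toList
    -- for i in range(slash + 1, len(path)): destination += path[i]
    let d3 := List.foldl (fun acc i => acc ++ [PySem.List.pyGetD cs i 'a'])
                d2 (PySem.List.pyRange (slash + 1) (PySem.List.len cs))
    String.ofList d3

-- ===== PORT B =====
-- hand port of str.rpartition for a single-character separator (PySem has no rpartition);
-- exact for a one-char separator: split at the LAST occurrence, or ('', '', s) if absent
def rpartitionChar (cs : List Char) (c : Char) : List Char × List Char × List Char :=
  match cs.reverse.dropWhile (· ≠ c) with
  | [] => ([], [], cs)
  | _ :: d => (d.reverse, [c], (cs.reverse.takeWhile (· ≠ c)).reverse)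

def form_destination_alt (path : String) : String :=
  let p := rpartitionChar path.toList '\\'
  String.ofList (p.1 ++ p.2.1 ++ "out_".toList ++ p.2.2)

-- ===== PRECONDITION & SPEC =====
def Spec_form_destination (path : String) (out : String) : Prop := out = form_destination_alt path
instance (path : String) (out : String) : Decidable (Spec_form_destination path out) := by unfold Spec_form_destination; infer_instance

-- ===== CLAIM (what is proved, stated in full; the proofs are below) =====
def Claim_equal_form_destination : Prop := ∀ (path : String), Dom_form_destination path → Spec_form_destination path (form_destination path)

-- ===== LEMMAS AND PROOFS =====

-- [c].isPrefixOf l checks exactly the head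
theorem isPrefixOf_singleton (c : Char) (l : List Char) :
    List.isPrefixOf [c] l = true ↔ l.head? = some c := by
  cases l with
  | nil => simp [List.isPrefixOf]
  | cons x t =>
      simp [List.isPrefixOf]
      exact eq_comm

theorem rfind_go_succ (s sub : List Char) (j : Nat) :
    PySem.Chars.rfind.go s sub (j+1)
      = if sub.isPrefixOf (s.drop (j+1)) then ((j+1 : Nat) : Int) else PySem.Chars.rfind.go s sub j := by
  simp [PySem.Chars.rfind.go]

theorem rfind_go_zero (s sub : List Char) :
    PySem.Chars.rfind.go s sub 0 = if sub.isPrefixOf s then (0:Int) else -1 := by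
  simp [PySem.Chars.rfind.go]

theorem rfind_go_none (s : List Char) (c : Char) (n : Nat)
    (h : ∀ i ≤ n, (s.drop i).head? ≠ some c) :
    PySem.Chars.rfind.go s [c] n = -1 := by
  induction n with
  | zero =>
      rw [rfind_go_zero, if_neg]
      intro hp
      exact h 0 (le_refl 0) ((isPrefixOf_singleton c s).mp hp)
  | succ j ih =>
      rw [rfind_go_succ, if_neg]
      · exact ih (fun i hi => h i (Nat.le_succ_of_le hi))
      · intro hp
        exact h (j+1) (le_refl _) ((isPrefixOf_singleton c _).mp hp)

theorem rfind_go_hit (s : List Char) (c : Char) (k : Nat) (n : Nat)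
    (hkn : k ≤ n) (hk : (s.drop k).head? = some c)
    (hmiss : ∀ i, k < i → i ≤ n → (s.drop i).head? ≠ some c) :
    PySem.Chars.rfind.go s [c] n = (k : Int) := by
  induction n with
  | zero =>
      have hk0 : k = 0 := Nat.le_zero.mp hkn
      subst hk0
      rw [rfind_go_zero, if_pos ((isPrefixOf_singleton c s).mpr (by simpa using hk))]
      simp
  | succ j ih =>
      rw [rfind_go_succ]
      by_cases hp : List.isPrefixOf [c] (s.drop (j+1)) = true
      · have hh := (isPrefixOf_singleton c _).mp hp
        have : k = j + 1 := by
          by_contra hne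
          exact hmiss (j+1) (lt_of_le_of_ne hkn hne) (le_refl _) hh
        simp [hp, this]
      · rw [if_neg hp]
        have hkj : k ≤ j := by
          rcases Nat.lt_or_ge k (j+1) with h | h
          · omega
          · exfalso
            have : k = j + 1 := le_antisymm hkn h
            exact hp ((isPrefixOf_singleton c _).mpr (this ▸ hk))
        exact ih hkj (fun i hi hij => hmiss i hi (Nat.le_succ_of_le hij))

-- A's first copy loop reads cs[0..b-1]
theorem map_pyGetD_range_take (cs : List Char) (d : Char) :
    ∀ b : Nat, b ≤ cs.length →
      (PySem.List.pyRange 0 (b : Int)).map (fun i => PySem.List.pyGetD cs i d) = cs.take b := by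
  intro b
  induction b with
  | zero => intro _; simp [PySem.List.pyRange_one_eq_nil]
  | succ m ih =>
      intro hle
      have h1 : ((m+1 : Nat) : Int) = (m : Int) + 1 := by push_cast; ring
      rw [h1, PySem.List.pyRange_one_succ_right (by positivity), List.map_append]
      have hm : m < cs.length := by omega
      rw [ih (le_of_lt hm), List.map_singleton,
          PySem.List.pyGetD_eq_getElem cs d (by positivity) (by exact_mod_cast hm)]
      rw [List.take_succ_eq_append_getElem hm]
      simp

theorem form_destination_eq (path : String) :
    form_destination path = form_destination_alt path := by
  set cs := path.toList with hcs
  by_cases hmem : '\\' ∈ cs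
  · -- decompose cs at the last backslash
    have hdne : cs.reverse.dropWhile (· ≠ '\\') ≠ [] := by
      intro h
      have := List.dropWhile_eq_nil_iff.mp h '\\' (by simpa using hmem)
      simp at this
    obtain ⟨x, d', hd⟩ := List.exists_cons_of_ne_nil hdne
    have hx : x = '\\' := by
      have hhead := List.head_dropWhile_not (fun ch => decide (ch ≠ '\\')) (l := cs.reverse)
        (by simpa using hdne)
      have hq : (cs.reverse.dropWhile (· ≠ '\\')).head? = some x := by rw [hd]; rfl
      rw [List.head?_eq_some_head (by simpa using hdne)] at hq
      rw [Option.some.injEq] at hq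
      rw [hq] at hhead
      simpa using hhead
    subst hx
    have hsplit0 : cs = d'.reverse ++ '\\' :: (cs.reverse.takeWhile (· ≠ '\\')).reverse := by
      conv_lhs => rw [← List.reverse_reverse cs,
        ← List.takeWhile_append_dropWhile (p := fun ch => decide (ch ≠ '\\')) (l := cs.reverse), hd]
      simp
    set suf := (cs.reverse.takeWhile (· ≠ '\\')).reverse with hsuf
    set pre := d'.reverse with hpre
    have hsplit : cs = pre ++ '\\' :: suf := hsplit0
    have hsufne : ∀ ch ∈ suf, ch ≠ '\\' := by
      intro ch hch
      have : ch ∈ cs.reverse.takeWhile (· ≠ '\\') := by simpa [hsuf] using hch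
      simpa using List.mem_takeWhile_imp this
    set k := pre.length with hk
    have hlen : cs.length = k + 1 + suf.length := by
      rw [hsplit]; simp; omega
    have hhit : (cs.drop k).head? = some '\\' := by
      rw [hsplit, hk, List.drop_left]; rfl
    have hmiss : ∀ i, k < i → i ≤ cs.length → (cs.drop i).head? ≠ some '\\' := by
      intro i hki hil hhd
      rw [List.head?_drop, hsplit, List.getElem?_append_right (by omega)] at hhd
      have hg : ('\\' :: suf)[i - pre.length]? = suf[i - pre.length - 1]? := by
        have h2 : i - pre.length = (i - pre.length - 1) + 1 := by omega
        rw [h2]; simp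
      rw [hg] at hhd
      exact hsufne '\\' (List.mem_of_getElem? hhd) rfl
    have hrf : PySem.Str.rfind path "\\" = (k : Int) := by
      rw [PySem.Str.rfind_eq]
      have hb : "\\".toList = ['\\'] := rfl
      rw [hb, ← hcs, PySem.Chars.rfind]
      exact rfind_go_hit cs '\\' k cs.length (by omega) hhit hmiss
    have hne : ¬ ((k : Int) = -1) := by omega
    have htake : cs.take (k+1) = pre ++ ['\\'] := by
      rw [hsplit, hk]
      simpa using List.take_length_add_append (l₁ := pre) (l₂ := '\\' :: suf) 1
    have hdropk : cs.drop (k + 1) = suf := by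
      rw [hsplit, hk]
      simp [List.drop_length_add_append (l₁ := pre) (l₂ := '\\' :: suf) 1]
    simp only [form_destination, form_destination_alt, rpartitionChar, ← hcs]
    rw [hrf, if_neg hne]
    simp only [PySem.List.foldl_append_singleton_eq_map]
    have hcast : (k : Int) + 1 = ((k + 1 : Nat) : Int) := by push_cast; ring
    rw [hcast, map_pyGetD_range_take cs 'a' (k+1) (by omega),
      PySem.List.map_pyGetD_pyRange cs 'a' (by positivity), Int.toNat_natCast,
      htake, hdropk, hd]
    simp only [← hpre, ← hsuf]
    simp [List.append_assoc]
  · -- no backslash: A takes the slash == -1 branch, B's rpartition yields ('', '', path)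
    have hrf : PySem.Str.rfind path "\\" = -1 := by
      rw [PySem.Str.rfind_eq]
      have hb : "\\".toList = ['\\'] := rfl
      rw [hb, ← hcs, PySem.Chars.rfind]
      apply rfind_go_none
      intro i _ hhd
      rw [List.head?_drop] at hhd
      exact hmem (List.mem_of_getElem? hhd)
    have hdnil : cs.reverse.dropWhile (· ≠ '\\') = [] := by
      apply List.dropWhile_eq_nil_iff.mpr
      intro ch hch
      have hmm : ch ∈ cs := by simpa using hch
      simp only [ne_eq, decide_eq_true_eq]
      intro h; subst h; exact hmem hmm
    simp only [form_destination, form_destination_alt, rpartitionChar, ← hcs]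
    rw [hrf, if_pos rfl, hdnil]
    simp

-- ===== VERDICT (by name: the statement is the Claim_ definition above) =====
theorem form_destination_spec : Claim_equal_form_destination := by
  intro path _
  unfold Spec_form_destination
  exact form_destination_eq path
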